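-- pv_equiv track=rewrite | github.com/nicklave/Progetti_esercizi_unical | Esercizi_python/matrix_true_false.py | funzione
-- ===== SOURCE A (Python) =====
-- def funzione(matrice):
--     lista = []
--     for i in range(len(matrice[0])):
--         zero = False
--         for j in range(len(matrice)):
--             if matrice[j][i] == 0:
--                 zero = True
--         lista.append(zero)
--
--     lista2 = []
--     for i in range(len(matrice[0])):
--         somma = 0
--         for j in range(len(matrice)):
--             somma += matrice[j][i]
--         lista2.append(somma)
--     return (lista, lista2)
-- ===== SOURCE B (Python) =====
-- def funzione(matrice):
--     n = len(matrice[0])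
--     flags = [False] * n
--     sums = [0] * n
--     for row in matrice:
--         flags = [f or x == 0 for f, x in zip(flags, row)]
--         sums = [s + x for s, x in zip(sums, row)]
--     return (flags, sums)
-- ===== Notes on version B (the rewrite author's own statement) =====
-- stated objective: alternative
-- what changed: B makes a single row-major pass over the matrix, maintaining per-column flags and sums vectors updated element-wise via zip comprehensions, instead of A's two column-major double loops that re-index matrice[j][i] for every (column,row) pair.
import Mathlib
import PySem

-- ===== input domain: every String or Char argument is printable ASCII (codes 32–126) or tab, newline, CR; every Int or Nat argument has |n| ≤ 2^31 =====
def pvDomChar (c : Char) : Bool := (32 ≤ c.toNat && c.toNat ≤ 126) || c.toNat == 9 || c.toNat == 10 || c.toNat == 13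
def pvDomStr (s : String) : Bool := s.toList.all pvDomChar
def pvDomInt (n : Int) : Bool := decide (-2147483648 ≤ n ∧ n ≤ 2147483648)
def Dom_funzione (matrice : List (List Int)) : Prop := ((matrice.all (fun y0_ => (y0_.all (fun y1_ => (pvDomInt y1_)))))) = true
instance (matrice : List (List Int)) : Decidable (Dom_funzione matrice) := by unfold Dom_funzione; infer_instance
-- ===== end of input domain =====

-- B replaces A's two column-major double loops by a single row-major pass that keeps
-- per-column running flags and sums vectors (objective: alternative decomposition).

-- ===== PORT A =====
-- literal port: two passes over range(len(matrice[0])), each with an inner loop over the rows;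
-- out-of-range accesses (excluded by Pre_funzione) are read through pyGet? with an inert default.
def funzione (matrice : List (List Int)) : List Bool × List Int :=
  let n0 := ((PySem.List.pyGet? matrice 0).getD []).length
  let lista := (List.range n0).foldl (fun acc i =>
      acc ++ [matrice.foldl (fun zero row =>
        if (PySem.List.pyGet? row (Int.ofNat i)).getD 1 = 0 then true else zero) false]) []
  let lista2 := (List.range n0).foldl (fun acc i =>
      acc ++ [matrice.foldl (fun somma row =>
        somma + (PySem.List.pyGet? row (Int.ofNat i)).getD 0) 0]) []
  (lista, lista2)

-- ===== PORT B =====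
-- one pass over the rows, updating the flags and sums accumulators element-wise (zip truncates)
def funzione_alt (matrice : List (List Int)) : List Bool × List Int :=
  let n := ((PySem.List.pyGet? matrice 0).getD []).length
  let flags := matrice.foldl
    (fun fs row => (fs.zip row).map (fun p => p.1 || (p.2 == 0))) (List.replicate n false)
  let sums := matrice.foldl
    (fun ss row => (ss.zip row).map (fun p => p.1 + p.2)) (List.replicate n 0)
  (flags, sums)

-- ===== PRECONDITION & SPEC =====
-- A raises IndexError iff matrice is empty or some row is shorter than row 0; Pre_ excludes exactly those.
def Pre_funzione (matrice : List (List Int)) : Prop :=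
  matrice ≠ [] ∧ ∀ r ∈ matrice, (matrice.headD []).length ≤ r.length
instance (matrice : List (List Int)) : Decidable (Pre_funzione matrice) := by unfold Pre_funzione; infer_instance

def pvWitness_funzione : List (List Int) := [[1, 0], [2, 3]]

def Spec_funzione (matrice : List (List Int)) (out : List Bool × List Int) : Prop := out = funzione_alt matrice
instance (matrice : List (List Int)) (out : List Bool × List Int) : Decidable (Spec_funzione matrice out) := by unfold Spec_funzione; infer_instance

-- ===== CLAIM (what is proved, stated in full; the proofs are below) =====
def Claim_equal_funzione : Prop := ∀ (matrice : List (List Int)), Dom_funzione matrice → Pre_funzione matrice → Spec_funzione matrice (funzione matrice)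

-- ===== LEMMAS AND PROOFS =====

-- B's row-major flags fold, read per column: element i is the column-i fold of the rows
lemma flags_foldl (l : List (List Int)) (fs : List Bool)
    (h : ∀ r ∈ l, fs.length ≤ r.length) :
    l.foldl (fun fs row => (fs.zip row).map (fun p => p.1 || (p.2 == 0))) fs
      = (List.range fs.length).map
          (fun i => l.foldl (fun z row => z || (row.getD i 0 == 0)) (fs.getD i false)) := by
  induction l generalizing fs with
  | nil =>
    apply List.ext_getElem (by simp)
    intro i h1 h2
    simp [List.getD_eq_getElem?_getD,
      List.getElem?_eq_getElem (show i < fs.length by simpa using h1)]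
  | cons r t ih =>
    have hr : fs.length ≤ r.length := h r (by simp)
    have hlen : ((fs.zip r).map (fun p => p.1 || (p.2 == 0))).length = fs.length := by
      simp [List.length_zip]; omega
    simp only [List.foldl_cons]
    rw [ih _ (fun r' hr' => by rw [hlen]; exact h r' (by simp [hr']))]
    rw [hlen]
    apply List.map_congr_left
    intro i hi
    have hi' : i < fs.length := List.mem_range.mp hi
    congr 1
    rw [List.getD_eq_getElem _ _ (by omega), List.getD_eq_getElem _ _ hi',
        List.getD_eq_getElem _ _ (by omega)]
    simp [List.getElem_zip]

-- B's row-major sums fold, read per column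
lemma sums_foldl (l : List (List Int)) (ss : List Int)
    (h : ∀ r ∈ l, ss.length ≤ r.length) :
    l.foldl (fun ss row => (ss.zip row).map (fun p => p.1 + p.2)) ss
      = (List.range ss.length).map
          (fun i => l.foldl (fun s row => s + row.getD i 0) (ss.getD i 0)) := by
  induction l generalizing ss with
  | nil =>
    apply List.ext_getElem (by simp)
    intro i h1 h2
    simp [List.getD_eq_getElem?_getD,
      List.getElem?_eq_getElem (show i < ss.length by simpa using h1)]
  | cons r t ih =>
    have hr : ss.length ≤ r.length := h r (by simp)
    have hlen : ((ss.zip r).map (fun p => p.1 + p.2)).length = ss.length := by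
      simp [List.length_zip]; omega
    simp only [List.foldl_cons]
    rw [ih _ (fun r' hr' => by rw [hlen]; exact h r' (by simp [hr']))]
    rw [hlen]
    apply List.map_congr_left
    intro i hi
    have hi' : i < ss.length := List.mem_range.mp hi
    congr 1
    rw [List.getD_eq_getElem _ _ (by omega), List.getD_eq_getElem _ _ hi',
        List.getD_eq_getElem _ _ (by omega)]
    simp [List.getElem_zip]

-- ===== VERDICT (by name: the statement is the Claim_ definition above) =====
theorem funzione_spec : Claim_equal_funzione := by
  intro matrice _ hpre
  obtain ⟨hne, hlen⟩ := hpre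
  obtain ⟨r0, t, rfl⟩ : ∃ r0 t, matrice = r0 :: t := by
    cases matrice with
    | nil => exact absurd rfl hne
    | cons a b => exact ⟨a, b, rfl⟩
  simp only [List.headD_cons] at hlen
  unfold Spec_funzione funzione funzione_alt
  have hn0 : ((PySem.List.pyGet? (r0 :: t) 0).getD []).length = r0.length := by
    simp [PySem.List.pyGet?, PySem.List.pyIdx?]
  simp only [hn0, PySem.List.foldl_append_singleton_eq_map, Prod.mk.injEq]
  rw [flags_foldl _ _ (by simpa using hlen), sums_foldl _ _ (by simpa using hlen)]
  simp only [List.length_replicate]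
  constructor
  · apply List.map_congr_left
    intro i hi
    have hi' : i < r0.length := List.mem_range.mp hi
    rw [List.getD_eq_getElem _ _ (by simpa using hi')]
    simp only [List.getElem_replicate]
    apply PySem.List.foldl_congr_mem
    intro z row hrow
    have hir : i < row.length := lt_of_lt_of_le hi' (hlen row hrow)
    have : (PySem.List.pyGet? row (Int.ofNat i)).getD 1 = row.getD i 0 := by
      simp [PySem.List.pyGet?_natCast, List.getElem?_eq_getElem hir]
    rw [this, List.getD_eq_getElem?_getD]
    by_cases hz : row[i]?.getD 0 = (0 : Int) <;> simp [hz]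
  · apply List.map_congr_left
    intro i hi
    have hi' : i < r0.length := List.mem_range.mp hi
    rw [List.getD_eq_getElem _ _ (by simpa using hi')]
    simp only [List.getElem_replicate]
    apply PySem.List.foldl_congr_mem
    intro s row hrow
    have hir : i < row.length := lt_of_lt_of_le hi' (hlen row hrow)
    simp [PySem.List.pyGet?_natCast, List.getElem?_eq_getElem hir]
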